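-- pv_equiv track=rewrite | github.com/franclab/acw-calc | fractional_slot.py | ran_series
-- ===== SOURCE A (Python) =====
-- def ran_series(N,d):
--     '''Genera la serie de una fase del grupo recurrente'''
--     series=[]
--     for i in range(int(3*N)):
--         new_value = 1+i*d
--         while new_value > 3*N:
--             j = 1
--             new_value = new_value - 3*N*j
--             j += 1
--         series.append(new_value)
--     return(series)
-- ===== SOURCE B (Python) =====
-- def ran_series(N, d):
--     '''Genera la serie de una fase del grupo recurrente'''
--     M = 3 * N
--     if M <= 0:
--         return []
--     return [v if v <= M else (v - 1) % M + 1 for v in (1 + i * d for i in range(M))]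
-- ===== Notes on version B (the rewrite author's own statement) =====
-- stated objective: faster
-- what changed: Replaces the inner repeated-subtraction while-loop with a direct floored-modulo formula ((v-1) % 3N + 1), computing each element in O(1).
import Mathlib
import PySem

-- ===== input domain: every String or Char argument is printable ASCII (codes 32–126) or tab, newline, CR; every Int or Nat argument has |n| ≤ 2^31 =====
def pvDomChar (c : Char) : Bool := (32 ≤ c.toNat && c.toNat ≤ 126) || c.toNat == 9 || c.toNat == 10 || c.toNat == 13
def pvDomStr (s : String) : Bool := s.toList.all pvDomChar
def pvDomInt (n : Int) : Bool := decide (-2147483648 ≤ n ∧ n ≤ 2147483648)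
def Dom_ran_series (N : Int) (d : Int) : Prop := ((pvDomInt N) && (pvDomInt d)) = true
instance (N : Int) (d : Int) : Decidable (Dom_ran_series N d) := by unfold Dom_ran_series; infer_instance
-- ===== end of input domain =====

-- B replaces A's inner repeated-subtraction loop by a direct modulo formula (asymptotically faster).

-- ===== PORT A =====
-- the 'while new_value > 3*N' loop (j is reset to 1 each pass, so it always subtracts 3*N once);
-- the '0 < M' conjunct is a totality guard only: A only reaches the loop with M = 3*N ≥ 1
def pvReduceA (M v : Int) : Int :=
  if _h : M < v ∧ 0 < M then pvReduceA M (v - M) else v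
termination_by (v - M).toNat
decreasing_by omega

def ran_series (N : Int) (d : Int) : List Int :=
  (PySem.List.pyRange 0 (3 * N) 1).foldl
    (fun series i => series ++ [pvReduceA (3 * N) (1 + i * d)]) []

-- ===== PORT B =====
def ran_series_alt (N : Int) (d : Int) : List Int :=
  let M := 3 * N
  if M ≤ 0 then []
  else (PySem.List.pyRange 0 M 1).map
    (fun i => let v := 1 + i * d; if v ≤ M then v else PySem.Int.mod (v - 1) M + 1)

-- ===== PRECONDITION & SPEC =====
def Spec_ran_series (N : Int) (d : Int) (out : List Int) : Prop := out = ran_series_alt N d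
instance (N : Int) (d : Int) (out : List Int) : Decidable (Spec_ran_series N d out) := by unfold Spec_ran_series; infer_instance

-- ===== CLAIM (what is proved, stated in full; the proofs are below) =====
def Claim_equal_ran_series : Prop := ∀ (N : Int) (d : Int), Dom_ran_series N d → Spec_ran_series N d (ran_series N d)

-- ===== LEMMAS AND PROOFS =====

theorem pvReduceA_eq (M v : Int) (hM : 0 < M) :
    pvReduceA M v = if v ≤ M then v else PySem.Int.mod (v - 1) M + 1 := by
  by_cases h : M < v
  · rw [pvReduceA, dif_pos ⟨h, hM⟩, if_neg (by omega : ¬ v ≤ M)]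
    rw [pvReduceA_eq M (v - M) hM]
    by_cases h2 : v - M ≤ M
    · rw [if_pos h2]
      rw [PySem.Int.mod_eq_emod_of_pos hM]
      have : (v - 1) % M = (v - 1 - M) % M := (Int.sub_emod_right (v-1) M).symm
      rw [this, Int.emod_eq_of_lt (by omega) (by omega)]
      omega
    · rw [if_neg h2]
      congr 1
      rw [PySem.Int.mod_eq_emod_of_pos hM, PySem.Int.mod_eq_emod_of_pos hM]
      have : (v - M - 1) = (v - 1) - M := by ring
      rw [this, Int.sub_emod_right]
  · rw [pvReduceA, dif_neg (by omega), if_pos (by omega)]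
termination_by (v - M).toNat
decreasing_by omega

theorem pvFoldlAppend {α β : Type} (f : α → β) (l : List α) (acc : List β) :
    l.foldl (fun s i => s ++ [f i]) acc = acc ++ l.map f := by
  induction l generalizing acc with
  | nil => simp
  | cons x xs ih => simp [List.foldl, ih]

-- ===== VERDICT (by name: the statement is the Claim_ definition above) =====
theorem ran_series_spec : Claim_equal_ran_series := by
  intro N d _
  unfold Spec_ran_series ran_series ran_series_alt
  by_cases hM : 3 * N ≤ 0
  · simp [hM, PySem.List.pyRange_one_eq_nil (by omega : (3*N) ≤ 0)]
  · simp only [if_neg hM]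
    rw [pvFoldlAppend]
    simp only [List.nil_append]
    apply List.map_congr_left
    intro i _
    rw [pvReduceA_eq _ _ (by omega)]
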